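-- pv_equiv track=rewrite | github.com/coker-group/afs_cortex | src/afs/pipeline.py | _contiguous_runs
-- ===== SOURCE A (Python) =====
-- def _contiguous_runs(pages: list[int]) -> list[list[int]]:
--     if not pages:
--         return []
--     pages = sorted(pages)
--     runs = [[pages[0]]]
--     for p in pages[1:]:
--         if p == runs[-1][-1] + 1:
--             runs[-1].append(p)
--         else:
--             runs.append([p])
--     out = []
--     for r in runs:
--         for i in range(0, len(r), 6):
--             out.append(r[i : i + 6])
--     return out
-- ===== SOURCE B (Python) =====
-- def _contiguous_runs(pages: list[int]) -> list[list[int]]: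
--     if not pages:
--         return []
--     spages = sorted(pages)
--     out = []
--     cur = [spages[0]]
--     for p in spages[1:]:
--         if p == cur[-1] + 1 and len(cur) < 6:
--             cur.append(p)
--         else:
--             out.append(cur)
--             cur = [p]
--     out.append(cur)
--     return out
-- ===== Notes on version B (the rewrite author's own statement) =====
-- stated objective: simpler
-- what changed: Replaces A's two-phase pipeline (build maximal consecutive runs by mutating the last run, then re-scan every run slicing it into 6-chunks) with one fused pass that emits each chunk directly, breaking when the page is not consecutive or the current chunk already has 6 elements.
import Mathlib
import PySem

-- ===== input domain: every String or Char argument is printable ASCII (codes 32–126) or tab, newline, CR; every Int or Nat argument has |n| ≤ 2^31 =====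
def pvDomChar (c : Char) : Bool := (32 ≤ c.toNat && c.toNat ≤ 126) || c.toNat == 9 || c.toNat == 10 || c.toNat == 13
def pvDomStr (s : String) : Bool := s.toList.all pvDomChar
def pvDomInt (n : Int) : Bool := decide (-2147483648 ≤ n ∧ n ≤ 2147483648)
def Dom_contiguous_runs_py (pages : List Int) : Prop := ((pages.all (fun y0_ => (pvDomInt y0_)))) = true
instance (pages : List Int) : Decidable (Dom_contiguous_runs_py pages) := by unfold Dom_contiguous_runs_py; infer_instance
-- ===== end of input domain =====

-- B fuses A's run-building and 6-chunking phases into a single pass (same return value; neither mutates its argument).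

-- ===== PORT A =====
def contiguous_runs_py (pages : List Int) : List (List Int) :=
  if pages = [] then []
  else
    let sp := PySem.List.sorted pages (fun x => x) false
    let runs := (PySem.List.slice sp (some 1) none).foldl
      (fun (runs : List (List Int)) p =>
        if p = (runs.getLastD []).getLastD 0 + 1 then
          runs.dropLast ++ [(runs.getLastD []) ++ [p]]   -- runs[-1].append(p)
        else runs ++ [[p]])
      [[sp.headD 0]]
    runs.foldl (fun out r =>
      (PySem.List.pyRange 0 r.length 6).foldl
        (fun out i => out ++ [PySem.List.slice r (some i) (some (i + 6))]) out) []

-- ===== PORT B =====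
def contiguous_runs_py_alt (pages : List Int) : List (List Int) :=
  if pages = [] then []
  else
    let sp := PySem.List.sorted pages (fun x => x) false
    let st := (PySem.List.slice sp (some 1) none).foldl
      (fun (s : List (List Int) × List Int) p =>
        if p = s.2.getLastD 0 + 1 ∧ s.2.length < 6 then (s.1, s.2 ++ [p])
        else (s.1 ++ [s.2], [p]))
      ([], [sp.headD 0])
    st.1 ++ [st.2]

-- ===== PRECONDITION & SPEC =====
def Spec_contiguous_runs_py (pages : List Int) (out : List (List Int)) : Prop := out = contiguous_runs_py_alt pages
instance (pages : List Int) (out : List (List Int)) : Decidable (Spec_contiguous_runs_py pages out) := by unfold Spec_contiguous_runs_py; infer_instance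

-- ===== CLAIM (what is proved, stated in full; the proofs are below) =====
def Claim_equal_contiguous_runs_py : Prop := ∀ (pages : List Int), Dom_contiguous_runs_py pages → Spec_contiguous_runs_py pages (contiguous_runs_py pages)

-- ===== LEMMAS AND PROOFS =====

/-- B's remaining computation: current chunk `cur`, remaining pages. -/
def fuse (cur : List Int) : List Int → List (List Int)
  | [] => [cur]
  | p :: rest =>
      if p = cur.getLastD 0 + 1 ∧ cur.length < 6 then fuse (cur ++ [p]) rest
      else cur :: fuse [p] rest

/-- A's run-building, as structural recursion on the remaining pages. -/
def runsRec (cur : List Int) : List Int → List (List Int)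
  | [] => [cur]
  | p :: rest =>
      if p = cur.getLastD 0 + 1 then runsRec (cur ++ [p]) rest
      else cur :: runsRec [p] rest

/-- Chunk a list into pieces of 6. -/
def chunk6 : List Int → List (List Int)
  | [] => []
  | a :: t => ((a :: t).take 6) :: chunk6 ((a :: t).drop 6)
termination_by r => r.length
decreasing_by simp

theorem getLastD_one' (a : List Int) (d : List Int) : ([a] : List (List Int)).getLastD d = a := rfl

theorem fuse_foldl (l : List Int) : ∀ (out : List (List Int)) (cur : List Int),
    (l.foldl (fun (s : List (List Int) × List Int) p =>
        if p = s.2.getLastD 0 + 1 ∧ s.2.length < 6 then (s.1, s.2 ++ [p])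
        else (s.1 ++ [s.2], [p])) (out, cur)).1
      ++ [(l.foldl (fun (s : List (List Int) × List Int) p =>
        if p = s.2.getLastD 0 + 1 ∧ s.2.length < 6 then (s.1, s.2 ++ [p])
        else (s.1 ++ [s.2], [p])) (out, cur)).2]
    = out ++ fuse cur l := by
  induction l with
  | nil => intro out cur; simp [fuse]
  | cons p rest ih =>
    intro out cur
    simp only [List.foldl_cons, fuse]
    by_cases h : p = cur.getLastD 0 + 1 ∧ cur.length < 6
    · rw [if_pos h, if_pos h]; exact ih out (cur ++ [p])
    · rw [if_neg h, if_neg h, ih]; simp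

theorem runsA_prefix (l : List Int) : ∀ (rs : List (List Int)) (r : List Int), r ≠ [] →
    l.foldl (fun (runs : List (List Int)) p =>
        if p = (runs.getLastD []).getLastD 0 + 1 then
          runs.dropLast ++ [(runs.getLastD []) ++ [p]]
        else runs ++ [[p]]) (rs ++ [r])
    = rs ++ l.foldl (fun (runs : List (List Int)) p =>
        if p = (runs.getLastD []).getLastD 0 + 1 then
          runs.dropLast ++ [(runs.getLastD []) ++ [p]]
        else runs ++ [[p]]) [r] := by
  induction l with
  | nil => intro rs r hr; simp
  | cons p rest ih =>
    intro rs r hr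
    simp only [List.foldl_cons, List.getLastD_concat, List.dropLast_concat,
      getLastD_one', List.dropLast_singleton, List.nil_append]
    by_cases h : p = r.getLastD 0 + 1
    · rw [if_pos h, if_pos h]
      exact ih rs (r ++ [p]) (by simp)
    · rw [if_neg h, if_neg h,
          ih (rs ++ [r]) [p] (by simp), ih [r] [p] (by simp)]
      simp

theorem runsA_eq_runsRec (l : List Int) : ∀ (r : List Int), r ≠ [] →
    l.foldl (fun (runs : List (List Int)) p =>
        if p = (runs.getLastD []).getLastD 0 + 1 then
          runs.dropLast ++ [(runs.getLastD []) ++ [p]]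
        else runs ++ [[p]]) [r]
    = runsRec r l := by
  induction l with
  | nil => intro r hr; simp [runsRec]
  | cons p rest ih =>
    intro r hr
    simp only [List.foldl_cons, runsRec, getLastD_one',
      List.dropLast_singleton, List.nil_append]
    by_cases h : p = r.getLastD 0 + 1
    · rw [if_pos h, if_pos h]
      exact ih (r ++ [p]) (by simp)
    · rw [if_neg h, if_neg h,
          runsA_prefix rest [r] [p] (by simp), ih [p] (by simp)]
      rfl

theorem runsRec_ne_nil (l : List Int) : ∀ cur, runsRec cur l ≠ [] := by
  induction l with
  | nil => intro cur; simp [runsRec]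
  | cons p rest ih =>
    intro cur
    simp only [runsRec]
    split
    · exact ih _
    · simp

theorem runsRec_prepend (l : List Int) : ∀ (pre c2 : List Int), c2 ≠ [] →
    runsRec (pre ++ c2) l
      = (pre ++ (runsRec c2 l).headD []) :: (runsRec c2 l).tail := by
  induction l with
  | nil => intro pre c2 h; simp [runsRec]
  | cons p rest ih =>
    intro pre c2 h
    have hlast : (pre ++ c2).getLastD 0 = c2.getLastD 0 := by
      rcases List.exists_cons_of_ne_nil h with ⟨a, t, rfl⟩
      rcases hx : (a :: t).getLast? with _ | x
      · simp at hx
      · simp [List.getLastD_eq_getLast?, hx]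
    simp only [runsRec, hlast]
    by_cases hc : p = c2.getLastD 0 + 1
    · simp only [if_pos hc]
      rw [show pre ++ c2 ++ [p] = pre ++ (c2 ++ [p]) by simp,
          ih pre (c2 ++ [p]) (by simp)]
    · simp only [if_neg hc]
      simp

theorem chunk6_nil : chunk6 [] = [] := by rw [chunk6.eq_def]

theorem chunk6_of_cons (r : List Int) (h : r ≠ []) :
    chunk6 r = r.take 6 :: chunk6 (r.drop 6) := by
  rcases List.exists_cons_of_ne_nil h with ⟨a, t, rfl⟩
  rw [chunk6.eq_def]

theorem chunk6_short (r : List Int) (h : r ≠ []) (hl : r.length ≤ 6) :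
    chunk6 r = [r] := by
  rw [chunk6_of_cons r h, List.take_of_length_le hl, List.drop_eq_nil_of_le hl, chunk6_nil]

theorem chunk6_prepend (c r : List Int) (h : c.length = 6) :
    chunk6 (c ++ r) = c :: chunk6 r := by
  have hc : c ≠ [] := by intro hc; rw [hc] at h; simp at h
  rw [chunk6_of_cons (c ++ r) (by simp [hc])]
  congr 1
  · rw [List.take_append_of_le_length (by omega), List.take_of_length_le (by omega)]
  · congr 1
    rw [List.drop_append_of_le_length (by omega), List.drop_eq_nil_of_le (by omega)]
    simp

theorem flatMap_runsRec_eq_fuse (l : List Int) : ∀ (cur : List Int),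
    cur ≠ [] → cur.length ≤ 6 → (runsRec cur l).flatMap chunk6 = fuse cur l := by
  induction l with
  | nil =>
    intro cur h hl
    simp [runsRec, fuse, chunk6_short cur h hl]
  | cons p rest ih =>
    intro cur h hl
    simp only [runsRec, fuse]
    by_cases hc : p = cur.getLastD 0 + 1
    · by_cases hlen : cur.length < 6
      · rw [if_pos hc, if_pos ⟨hc, hlen⟩]
        exact ih (cur ++ [p]) (by simp) (by simp; omega)
      · have h6 : cur.length = 6 := by omega
        rw [if_pos hc, if_neg (by intro ⟨_, hx⟩; omega)]
        have hne := runsRec_ne_nil rest [p]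
        rcases hh : runsRec [p] rest with _ | ⟨rh, rt⟩
        · exact absurd hh hne
        · rw [show cur ++ [p] = cur ++ [p] by rfl,
              runsRec_prepend rest cur [p] (by simp), hh]
          simp only [List.headD_cons, List.tail_cons, List.flatMap_cons]
          rw [chunk6_prepend cur rh h6]
          have := ih [p] (by simp) (by simp)
          rw [hh] at this
          simp only [List.flatMap_cons] at this
          simp [← this]
    · rw [if_neg hc, if_neg (by intro ⟨hx, _⟩; exact hc hx)]
      simp only [List.flatMap_cons]
      rw [chunk6_short cur h hl, ih [p] (by simp) (by simp)]
      simp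

theorem pyRange6_nil (a b : Int) (h : b ≤ a) : PySem.List.pyRange a b 6 = [] := by
  rw [PySem.List.pyRange_of_pos a b (by norm_num)]
  rw [if_neg (by omega)]
  simp

theorem pyRange6_cons (a b : Int) (h : a < b) :
    PySem.List.pyRange a b 6 = a :: PySem.List.pyRange (a + 6) b 6 := by
  rw [PySem.List.pyRange_of_pos a b (by norm_num),
      PySem.List.pyRange_of_pos (a + 6) b (by norm_num)]
  have hN : ((b - a + 6 - 1) / 6).toNat
      = (if a + 6 < b then ((b - (a + 6) + 6 - 1) / 6).toNat else 0) + 1 := by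
    split <;> omega
  rw [if_pos h, hN, List.range_succ_eq_map]
  simp only [List.map_cons, List.map_map]
  congr 1
  · norm_num
  · congr 1
    funext k
    simp only [Function.comp]
    push_cast
    ring

theorem chunkLoop (r : List Int) : ∀ (fuel j : Nat), r.length ≤ j + fuel →
    ∀ (out : List (List Int)),
    (PySem.List.pyRange (j : Int) (r.length : Int) 6).foldl
        (fun out i => out ++ [PySem.List.slice r (some i) (some (i + 6))]) out
      = out ++ chunk6 (r.drop j) := by
  intro fuel
  induction fuel with
  | zero =>
    intro j hj out
    rw [pyRange6_nil _ _ (by exact_mod_cast by omega),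
        List.drop_eq_nil_of_le (by omega), chunk6_nil]
    simp
  | succ n ih =>
    intro j hj out
    by_cases hlt : j < r.length
    · rw [pyRange6_cons _ _ (by exact_mod_cast hlt)]
      simp only [List.foldl_cons]
      have hsl : PySem.List.slice r (some (j : Int)) (some ((j : Int) + 6))
          = (r.drop j).take 6 := by
        have := PySem.List.slice_natCast_add r j 6
        simpa using this
      have hj6 : ((j : Int) + 6) = ((j + 6 : Nat) : Int) := by push_cast; ring
      rw [hsl, hj6, ih (j + 6) (by omega)]
      rw [chunk6_of_cons (r.drop j) (by simp; omega)]
      simp [List.drop_drop]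
    · rw [pyRange6_nil _ _ (by exact_mod_cast by omega),
          List.drop_eq_nil_of_le (by omega), chunk6_nil]
      simp

theorem chunkOuter (runs : List (List Int)) : ∀ (out : List (List Int)),
    runs.foldl (fun out r =>
      (PySem.List.pyRange 0 r.length 6).foldl
        (fun out i => out ++ [PySem.List.slice r (some i) (some (i + 6))]) out) out
    = out ++ runs.flatMap chunk6 := by
  induction runs with
  | nil => intro out; simp
  | cons r rs ih =>
    intro out
    simp only [List.foldl_cons, List.flatMap_cons]
    have h0 : (0 : Int) = ((0 : Nat) : Int) := rfl
    rw [h0, chunkLoop r r.length 0 (by omega) out]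
    simp only [Nat.cast_zero, List.drop_zero]
    rw [ih]
    simp

-- ===== VERDICT (by name: the statement is the Claim_ definition above) =====
theorem contiguous_runs_py_spec : Claim_equal_contiguous_runs_py := by
  intro pages _
  simp only [Spec_contiguous_runs_py, contiguous_runs_py, contiguous_runs_py_alt]
  by_cases hp : pages = []
  · simp [hp]
  · simp only [if_neg hp]
    rw [chunkOuter _ [], List.nil_append,
        runsA_eq_runsRec _ _ (by simp),
        flatMap_runsRec_eq_fuse _ _ (by simp) (by simp),
        fuse_foldl]
    simp
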